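-- pv_equiv track=rewrite | github.com/depixusgenome/trackanalysis | src/scripting/confusion.py | trackoligo
-- ===== SOURCE A (Python) =====
-- from   typing         import (Union, List, Sequence, Iterator, Tuple, Any,
--                               Iterable, NamedTuple, Optional)
--
-- def trackoligo(name:str, oligos: Sequence[str], reference = 'OR3') -> str:
--     "returns the oligo associated to a track"
--     lst  = {oli for oli in oligos if oli.upper() in name.upper()}
--     if not lst:
--         raise KeyError(f"Can not find the oligo corresponding to track {name}"
--                        " in the set of oligos {oligos}")
--
--     if len(lst) == 1 and next(iter(lst)) == reference:
--         return reference
--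
--     lst.discard(reference)
--     return next(i for i in oligos if i in lst)
-- ===== SOURCE B (Python) =====
-- def trackoligo(name: str, oligos, reference='OR3') -> str:
--     "returns the oligo associated to a track"
--     up = name.upper()
--     saw_reference = False
--     for oli in oligos:
--         if oli.upper() in up:
--             if oli != reference:
--                 return oli
--             saw_reference = True
--     if saw_reference:
--         return reference
--     raise KeyError(f"Can not find the oligo corresponding to track {name}"
--                    " in the set of oligos {oligos}")
-- ===== Notes on version B (the rewrite author's own statement) =====
-- stated objective: faster
-- what changed: B is a single early-exit loop with a boolean flag: it returns the first matching non-reference oligo immediately and never builds A's candidate set, never mutates it with discard, and never performs A's second scan over oligos.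
import Mathlib
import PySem

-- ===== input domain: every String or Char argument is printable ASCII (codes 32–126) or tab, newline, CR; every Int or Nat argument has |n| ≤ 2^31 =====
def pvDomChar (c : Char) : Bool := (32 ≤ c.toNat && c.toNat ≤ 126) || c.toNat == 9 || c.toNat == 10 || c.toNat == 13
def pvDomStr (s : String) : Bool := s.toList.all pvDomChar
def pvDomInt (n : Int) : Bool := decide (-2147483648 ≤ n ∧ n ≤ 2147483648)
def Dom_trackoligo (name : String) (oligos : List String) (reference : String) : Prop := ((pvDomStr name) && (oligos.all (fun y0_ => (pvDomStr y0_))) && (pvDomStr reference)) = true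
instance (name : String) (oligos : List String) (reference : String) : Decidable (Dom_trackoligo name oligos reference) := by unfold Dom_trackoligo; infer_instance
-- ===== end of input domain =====

-- B replaces A's set construction, discard and second scan by one early-exit
-- pass with a boolean flag (objective: faster, measured).


-- ===== PORT A =====
def trackoligo (name : String) (oligos : List String) (reference : String) : String :=
  let lst : PySem.Set String :=
    PySem.Set.ofList (oligos.filter
      (fun oli => PySem.Str.isIn (PySem.Str.upper oli) (PySem.Str.upper name)))
  if lst.isEmpty then ""      -- Python raises KeyError here; excluded by Pre_trackoligo
  else if lst.length == 1 && lst.head? == some reference then reference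
  else
    let lst' := lst.discard reference
    ((oligos.find? (fun i => lst'.contains i)).getD "")   -- next(...) cannot be exhausted here

-- ===== PORT B =====
-- B's loop: early return of the first matching non-reference oligo; the flag
-- records whether reference itself matched.
def trackoligoAltGo (up : String) (reference : String) :
    List String → Bool → String
  | [], sawReference => if sawReference then reference else ""
      -- Python raises KeyError on the "" branch; excluded by Pre_trackoligo
  | oli :: rest, sawReference =>
      if PySem.Str.isIn (PySem.Str.upper oli) up then
        if oli != reference then oli
        else trackoligoAltGo up reference rest true
      else trackoligoAltGo up reference rest sawReference

def trackoligo_alt (name : String) (oligos : List String) (reference : String) : String :=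
  trackoligoAltGo (PySem.Str.upper name) reference oligos false

-- ===== PRECONDITION & SPEC =====
-- Pre_ excludes exactly the inputs where no oligo's uppercase is a substring of
-- the uppercased name: there Python A (and B) raise KeyError.
def Pre_trackoligo (name : String) (oligos : List String) (reference : String) : Prop :=
  (oligos.any (fun oli => PySem.Str.isIn (PySem.Str.upper oli) (PySem.Str.upper name))) = true
instance (name : String) (oligos : List String) (reference : String) : Decidable (Pre_trackoligo name oligos reference) := by unfold Pre_trackoligo; infer_instance
def pvWitness_trackoligo : String × List String × String := ("track atg 3nM", ["ATG", "ccc"], "OR3")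

def Spec_trackoligo (name : String) (oligos : List String) (reference : String) (out : String) : Prop := out = trackoligo_alt name oligos reference
instance (name : String) (oligos : List String) (reference : String) (out : String) : Decidable (Spec_trackoligo name oligos reference out) := by unfold Spec_trackoligo; infer_instance

-- ===== CLAIM =====
def Claim_equal_trackoligo : Prop := ∀ (name : String) (oligos : List String) (reference : String), Dom_trackoligo name oligos reference → Pre_trackoligo name oligos reference → Spec_trackoligo name oligos reference (trackoligo name oligos reference)

-- ===== LEMMAS AND PROOFS =====

-- B's loop computes: the first matching non-reference oligo, else reference if
-- any oligo matched or the flag was set, else "".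
theorem go_characterization (up reference : String) :
    ∀ (l : List String) (b : Bool),
      trackoligoAltGo up reference l b =
        match l.find? (fun o => PySem.Str.isIn (PySem.Str.upper o) up && o != reference) with
        | some x => x
        | none => if b || l.any (fun o => PySem.Str.isIn (PySem.Str.upper o) up)
                  then reference else "" := by
  intro l
  induction l with
  | nil => intro b; cases b <;> rfl
  | cons a l ih =>
      intro b
      by_cases hm : PySem.Str.isIn (PySem.Str.upper a) up = true
      · have hm' : PySem.Chars.isIn (PySem.Chars.upper a.toList) up.toList = true := by
          simpa [PySem.Str.isIn, PySem.Str.upper] using hm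
        by_cases hr : (a != reference) = true
        · simp [trackoligoAltGo, hm', hr, List.find?]
        · simp only [Bool.not_eq_true] at hr
          simp [trackoligoAltGo, hm', hr, List.find?, ih]
      · simp only [Bool.not_eq_true] at hm
        have hm' : PySem.Chars.isIn (PySem.Chars.upper a.toList) up.toList = false := by
          simpa [PySem.Str.isIn, PySem.Str.upper] using hm
        simp [trackoligoAltGo, hm', List.find?, ih]

-- find? congruence over the members of the list
theorem find?_congr_mem {α : Type} (l : List α) (p q : α → Bool)
    (h : ∀ x ∈ l, p x = q x) : l.find? p = l.find? q := by
  induction l with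
  | nil => rfl
  | cons a l ih =>
      simp only [List.find?]
      rw [h a (List.mem_cons_self ..), ih (fun x hx => h x (List.mem_cons_of_mem _ hx))]

-- folding copies of elements already equal to everything in a singleton set keeps it
theorem ofList_all_eq {α : Type} [BEq α] [LawfulBEq α] (a : α) :
    ∀ (l : List α), (∀ x ∈ l, x = a) →
      ∀ (s : PySem.Set α), a ∈ s → l.foldl PySem.Set.add s = s := by
  intro l
  induction l with
  | nil => intro _ s _; rfl
  | cons x l ih =>
      intro h s hs
      have hx : x = a := h x (List.mem_cons_self ..)
      rw [List.foldl_cons, PySem.Set.add_of_mem (hx ▸ hs)]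
      exact ih (fun y hy => h y (List.mem_cons_of_mem _ hy)) s hs

-- a nonempty list all of whose members equal a has set(·) = [a]
theorem ofList_const {α : Type} [BEq α] [LawfulBEq α] (a : α) (l : List α)
    (hne : l ≠ []) (h : ∀ x ∈ l, x = a) : PySem.Set.ofList l = [a] := by
  cases l with
  | nil => exact absurd rfl hne
  | cons x l =>
      have hx : x = a := h x (List.mem_cons_self ..)
      have : PySem.Set.ofList (x :: l) = l.foldl PySem.Set.add [x] := by
        rw [PySem.Set.ofList_eq_foldl, List.foldl_cons]
        rfl
      rw [this, hx]
      exact ofList_all_eq a l (fun y hy => h y (List.mem_cons_of_mem _ hy)) [a]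
        (List.mem_singleton.mpr rfl)

-- ===== VERDICT =====
theorem trackoligo_spec : Claim_equal_trackoligo := by
  intro name oligos reference _ hpre
  unfold Spec_trackoligo trackoligo trackoligo_alt
  set p : String → Bool :=
    fun oli => PySem.Str.isIn (PySem.Str.upper oli) (PySem.Str.upper name) with hp
  rw [go_characterization]
  unfold Pre_trackoligo at hpre
  have hmatch : (oligos.filter p) ≠ [] := by
    rw [← List.length_pos_iff, List.length_filter_pos_iff]
    obtain ⟨x, hx, hpx⟩ := List.any_eq_true.mp hpre
    exact ⟨x, hx, hpx⟩
  have hsetne : PySem.Set.ofList (oligos.filter p) ≠ [] := by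
    intro hnil
    have := PySem.Set.mem_ofList (xs := oligos.filter p)
    obtain ⟨x, hx⟩ := List.exists_mem_of_ne_nil _ hmatch
    have : x ∈ PySem.Set.ofList (oligos.filter p) := (PySem.Set.mem_ofList _ _).mpr hx
    simp [hnil] at this
  cases hfind : oligos.find? (fun o => p o && o != reference) with
  | none =>
      -- every matching oligo equals reference; the set is [reference]
      have hall : ∀ x ∈ oligos.filter p, x = reference := by
        intro x hx
        obtain ⟨hx₁, hx₂⟩ := List.mem_filter.mp hx
        have := List.find?_eq_none.mp hfind x hx₁
        simp [hx₂] at this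
        exact this
      have hset : PySem.Set.ofList (oligos.filter p) = [reference] :=
        ofList_const reference _ hmatch hall
      simp only [hset]
      simp
      intro hnone
      obtain ⟨y, hy, hpy⟩ := List.any_eq_true.mp hpre
      have := hnone y hy
      simp [PySem.Str.isIn, PySem.Str.upper] at hpy
      exact absurd hpy (by simp [this])
  | some x =>
      -- some matching oligo differs from reference: not the singleton-reference case
      have hx := List.find?_some hfind
      have hxmem := List.mem_filter.mpr ⟨List.mem_of_find?_eq_some hfind, (Bool.and_elim_left hx)⟩
      have hxref : x ≠ reference := by
        have := Bool.and_elim_right hx; simpa using this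
      have hxset : x ∈ PySem.Set.ofList (oligos.filter p) :=
        (PySem.Set.mem_ofList _ _).mpr hxmem
      have hnotsing :
          ((PySem.Set.ofList (oligos.filter p)).length == 1 &&
            (PySem.Set.ofList (oligos.filter p)).head? == some reference) = false := by
        cases hs : PySem.Set.ofList (oligos.filter p) with
        | nil => exact absurd hs hsetne
        | cons y t =>
            cases t with
            | nil =>
                rw [hs] at hxset
                have : x = y := by simpa using hxset
                subst this
                simp [hxref]
            | cons z t' => simp
      rw [if_neg (by simpa using hsetne), if_neg (by simp [hnotsing])]
      -- A's second scan finds the same x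
      have hscan :
          oligos.find? (fun i =>
            ((PySem.Set.ofList (oligos.filter p)).discard reference).contains i)
          = some x := by
        rw [find?_congr_mem oligos _ (fun o => p o && o != reference)
          (by
            intro o ho
            have : ((PySem.Set.ofList (oligos.filter p)).discard reference).contains o
                = (decide (o ∈ oligos ∧ p o = true) && (o != reference)) := by
              simp [PySem.Set.mem_discard, PySem.Set.mem_ofList, List.mem_filter, bne]
              by_cases hor : o = reference <;> simp [hor]
            rw [this]
            simp [ho])]
        exact hfind
      show (List.find? (fun i =>
          ((PySem.Set.ofList (List.filter p oligos)).discard reference).contains i) oligos).getD ""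
        = x
      rw [hscan]
      rfl
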